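-- pv_equiv track=rewrite | github.com/yuhui7red/TsinghuaCloudGroup | MultiHost/AssignStrategy/LoadBalancing.py | LoadBalancing
-- ===== SOURCE A (Python) =====
-- def LoadBalancing(restVM, agentNumber):
--     restVM = sorted(restVM, key = lambda d:d[1], reverse = True)
--     restVMNumber = len(restVM)
--     agentLoad = [0 for i in range(agentNumber)]
--     mapping = []
--
--     minAgentId = 0
--     for i in range(restVMNumber):
--         agentLoad[minAgentId] += restVM[i][1]
--         mapping.append([restVM[i][0], minAgentId+1])
--         minAgentId = 0
--         for j in range(agentNumber):
--             if agentLoad[j] < agentLoad[minAgentId]: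
--                 minAgentId = j
--     mapping = sorted(mapping, key = lambda d:d[0])
--     return mapping
-- ===== SOURCE B (Python) =====
-- def LoadBalancing(restVM, agentNumber):
--     # Agents kept as a list of (load, id) pairs sorted ascending by (load, id):
--     # the least-loaded agent (smallest id on ties) is always at the front, so we
--     # pop it, assign the VM, and re-insert the updated pair at its sorted position.
--     vms = sorted(restVM, key=lambda d: d[1], reverse=True)
--     agents = [(0, i) for i in range(agentNumber)]
--     mapping = []
--     for vm in vms:
--         load, aid = agents[0]
--         rest = agents[1:]
--         mapping.append([vm[0], aid + 1])
--         agents = _insort(rest, (load + vm[1], aid))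
--     return sorted(mapping, key=lambda d: d[0])
--
--
-- def _insort(agents, p):
--     # insert p into the (load, id)-sorted list, keeping it sorted
--     k = 0
--     while k < len(agents) and not (p < agents[k]):
--         k += 1
--     return agents[:k] + [p] + agents[k:]
-- ===== Notes on version B (the rewrite author's own statement) =====
-- stated objective: alternative
-- what changed: A keeps an array of per-agent loads and rescans all agents for the minimum after every assignment; B keeps the agents as a list of (load, id) pairs maintained in sorted order, so the least-loaded agent is popped from the front and the updated pair is re-inserted at its sorted position.
import Mathlib
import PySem

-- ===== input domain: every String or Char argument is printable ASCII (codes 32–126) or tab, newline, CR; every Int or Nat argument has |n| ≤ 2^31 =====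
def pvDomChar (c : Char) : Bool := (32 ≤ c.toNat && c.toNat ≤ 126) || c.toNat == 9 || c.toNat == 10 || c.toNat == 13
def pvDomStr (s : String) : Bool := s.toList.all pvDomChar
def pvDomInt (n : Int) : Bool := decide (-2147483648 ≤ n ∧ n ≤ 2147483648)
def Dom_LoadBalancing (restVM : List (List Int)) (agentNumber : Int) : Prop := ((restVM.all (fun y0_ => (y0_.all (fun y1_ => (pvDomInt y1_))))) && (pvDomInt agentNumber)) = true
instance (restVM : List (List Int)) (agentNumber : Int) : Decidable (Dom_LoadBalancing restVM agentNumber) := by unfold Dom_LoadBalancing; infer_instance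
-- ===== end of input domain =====

-- B replaces A's full rescan of all agent loads per VM by a front-sorted list of (load, id)
-- pairs (pop the least-loaded agent, re-insert the updated pair at its sorted position);
-- same results, alternative data structure.

-- ===== PORT A =====
-- Python lists are O(1)-indexed arrays, so A's agentLoad is ported as a Lean Array;
-- pvAGet/pvASet compute exactly PySem's pyGetD/pySetD on the array's list (proved below)
def pvAGet (a : Array Int) (i : Int) (d : Int) : Int :=
  ((PySem.List.pyIdx? a.size i).bind (fun k => a[k]?)).getD d

def pvASet (a : Array Int) (i : Int) (v : Int) : Array Int :=
  ((PySem.List.pyIdx? a.size i).map (fun k => a.setIfInBounds k v)).getD a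

-- inner 'for j in range(agentNumber)' scan for the least-loaded agent (first minimum)
def pvAScan (agentNumber : Int) (loads : Array Int) : Int :=
  (PySem.List.pyRange 0 agentNumber 1).foldl
    (fun m j => if pvAGet loads j 0 < pvAGet loads m 0 then j else m) 0

-- one iteration of A's outer loop; state = (agentLoad, mapping, minAgentId)
def pvAStep (agentNumber : Int) (st : Array Int × List (List Int) × Int) (vm : List Int) :
    Array Int × List (List Int) × Int :=
  let loads := pvASet st.1 st.2.2 (pvAGet st.1 st.2.2 0 + PySem.List.pyGetD vm 1 0)
  (loads, st.2.1 ++ [[PySem.List.pyGetD vm 0 0, st.2.2 + 1]], pvAScan agentNumber loads)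

def LoadBalancing (restVM : List (List Int)) (agentNumber : Int) : List (List Int) :=
  let vms := PySem.List.sorted restVM (fun d => PySem.List.pyGetD d 1 0) true
  let agentLoad : Array Int := ((PySem.List.pyRange 0 agentNumber 1).map (fun _ => (0 : Int))).toArray
  let st := (PySem.List.pyRange 0 (PySem.List.len vms) 1).foldl
    (fun st i => pvAStep agentNumber st (PySem.List.pyGetD vms i []))
    (agentLoad, ([], 0))
  PySem.List.sorted st.2.1 (fun d => PySem.List.pyGetD d 0 0) false

-- ===== PORT B =====
-- Python's tuple comparison 'p < q' on (Int, Int) pairs (lexicographic; exact since both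
-- components are ints): Lean's Prod '<' is pointwise, so it is spelled out by hand here
def pvLexLt (p q : Int × Int) : Bool := p.1 < q.1 || (p.1 == q.1 && p.2 < q.2)

-- hand port of Source B's _insort: the while loop counts the leading elements q with
-- not (p < q) — that prefix is exactly takeWhile — and p is inserted between the
-- slices agents[:k] and agents[k:]; exact on every input, same comparisons
def pvInsort (agents : List (Int × Int)) (p : Int × Int) : List (Int × Int) :=
  agents.takeWhile (fun q => !(pvLexLt p q)) ++ p :: agents.dropWhile (fun q => !(pvLexLt p q))

-- one iteration of B's loop; state = (agents, mapping)
def pvBStep (st : List (Int × Int) × List (List Int)) (vm : List Int) :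
    List (Int × Int) × List (List Int) :=
  let p := PySem.List.pyGetD st.1 0 ((0 : Int), (0 : Int))
  let rest := PySem.List.slice st.1 (some 1) none
  (pvInsort rest (p.1 + PySem.List.pyGetD vm 1 0, p.2),
   st.2 ++ [[PySem.List.pyGetD vm 0 0, p.2 + 1]])

def LoadBalancing_alt (restVM : List (List Int)) (agentNumber : Int) : List (List Int) :=
  let vms := PySem.List.sorted restVM (fun d => PySem.List.pyGetD d 1 0) true
  let agents := (PySem.List.pyRange 0 agentNumber 1).map (fun i => ((0 : Int), i))
  let st := vms.foldl pvBStep (agents, [])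
  PySem.List.sorted st.2 (fun d => PySem.List.pyGetD d 0 0) false

-- ===== PRECONDITION & SPEC =====
-- A raises IndexError when some VM row has fewer than 2 entries (d[1] in the sort key) or
-- when restVM is nonempty but agentNumber < 1 (agentLoad[0] on an empty/short load list);
-- Pre_ excludes exactly those inputs.
def Pre_LoadBalancing (restVM : List (List Int)) (agentNumber : Int) : Prop :=
  (∀ row ∈ restVM, 2 ≤ row.length) ∧ (restVM = [] ∨ 1 ≤ agentNumber)
instance (restVM : List (List Int)) (agentNumber : Int) : Decidable (Pre_LoadBalancing restVM agentNumber) := by unfold Pre_LoadBalancing; infer_instance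

def pvWitness_LoadBalancing : List (List Int) × Int := ([[1, 3], [2, 5], [3, 4]], 2)

def Spec_LoadBalancing (restVM : List (List Int)) (agentNumber : Int) (out : List (List Int)) : Prop := out = LoadBalancing_alt restVM agentNumber
instance (restVM : List (List Int)) (agentNumber : Int) (out : List (List Int)) : Decidable (Spec_LoadBalancing restVM agentNumber out) := by unfold Spec_LoadBalancing; infer_instance

-- ===== CLAIM (what is proved, stated in full; the proofs are below) =====
def Claim_equal_LoadBalancing : Prop := ∀ (restVM : List (List Int)) (agentNumber : Int), Dom_LoadBalancing restVM agentNumber → Pre_LoadBalancing restVM agentNumber → Spec_LoadBalancing restVM agentNumber (LoadBalancing restVM agentNumber)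

-- ===== LEMMAS AND PROOFS =====

-- list-level model of A's loop (what the Array port computes, on Array.toList)
def pvLScan (agentNumber : Int) (loads : List Int) : Int :=
  (PySem.List.pyRange 0 agentNumber 1).foldl
    (fun m j => if PySem.List.pyGetD loads j 0 < PySem.List.pyGetD loads m 0 then j else m) 0

def pvLStep (agentNumber : Int) (st : List Int × List (List Int) × Int) (vm : List Int) :
    List Int × List (List Int) × Int :=
  let loads := PySem.List.pySetD st.1 st.2.2 (PySem.List.pyGetD st.1 st.2.2 0 + PySem.List.pyGetD vm 1 0)
  (loads, st.2.1 ++ [[PySem.List.pyGetD vm 0 0, st.2.2 + 1]], pvLScan agentNumber loads)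

lemma pvAGet_eq (a : Array Int) (i d : Int) :
    pvAGet a i d = PySem.List.pyGetD a.toList i d := by
  unfold pvAGet
  simp only [PySem.List.pyGetD, PySem.List.pyGet?, Array.length_toList]
  cases PySem.List.pyIdx? a.size i with
  | none => rfl
  | some k => simp [Array.getElem?_toList]

lemma pvASet_toList (a : Array Int) (i v : Int) :
    (pvASet a i v).toList = PySem.List.pySetD a.toList i v := by
  unfold pvASet
  simp only [PySem.List.pySetD, PySem.List.pySet?, Array.length_toList]
  cases PySem.List.pyIdx? a.size i with
  | none => rfl
  | some k => simp [Array.toList_setIfInBounds]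

lemma pvAScan_eq (n : Int) (a : Array Int) : pvAScan n a = pvLScan n a.toList := by
  have hf : (fun (m j : Int) => if pvAGet a j 0 < pvAGet a m 0 then j else m)
      = (fun (m j : Int) =>
          if PySem.List.pyGetD a.toList j 0 < PySem.List.pyGetD a.toList m 0 then j else m) := by
    funext m j
    rw [pvAGet_eq, pvAGet_eq]
  unfold pvAScan pvLScan
  rw [hf]

lemma pvAStep_abs (n : Int) (st : Array Int × List (List Int) × Int) (vm : List Int) :
    ((pvAStep n st vm).1.toList, (pvAStep n st vm).2.1, (pvAStep n st vm).2.2)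
      = pvLStep n (st.1.toList, st.2.1, st.2.2) vm := by
  unfold pvAStep pvLStep
  simp only [pvASet_toList, pvAGet_eq, pvAScan_eq]

lemma pvFold_abs (n : Int) (vms : List (List Int)) :
    ∀ st : Array Int × List (List Int) × Int,
    (((vms.foldl (pvAStep n) st).1.toList, (vms.foldl (pvAStep n) st).2.1,
        (vms.foldl (pvAStep n) st).2.2))
      = vms.foldl (pvLStep n) (st.1.toList, st.2.1, st.2.2) := by
  induction vms with
  | nil => intro st; rfl
  | cons v t ih =>
    intro st
    rw [List.foldl_cons, List.foldl_cons, ih, pvAStep_abs]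

-- the (load, agentId) pairs of A's load array, in agent order
def pvPairs (loads : List Int) : List (Int × Int) :=
  (PySem.List.enumerate loads 0).map (fun p => (p.2, p.1))

-- the invariant tying A's fold state to B's fold state (n = number of agents)
def pvInv (n : Nat) (stA : List Int × List (List Int) × Int)
    (stB : List (Int × Int) × List (List Int)) : Prop :=
  stA.1.length = n ∧
  stB.1.Perm (pvPairs stA.1) ∧
  stB.1.Pairwise (fun p q => pvLexLt p q = true) ∧
  stA.2.2 = pvLScan (n : Int) stA.1 ∧
  stA.2.1 = stB.2

lemma pvPairs_length (loads : List Int) : (pvPairs loads).length = loads.length := by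
  simp [pvPairs]

lemma pvPairs_getElem (loads : List Int) (k : Nat) (hk : k < loads.length) :
    (pvPairs loads)[k]'(by simpa [pvPairs_length]) = (loads[k], (k : Int)) := by
  simp [pvPairs, PySem.List.getElem_enumerate]


lemma pvLexLt_iff (p q : Int × Int) :
    pvLexLt p q = true ↔ (p.1 < q.1 ∨ (p.1 = q.1 ∧ p.2 < q.2)) := by
  simp [pvLexLt]

-- structural model of pvInsort, convenient for induction
def pvInsortRec (agents : List (Int × Int)) (p : Int × Int) : List (Int × Int) :=
  match agents with
  | [] => [p]
  | q :: rest => if pvLexLt p q then p :: q :: rest else q :: pvInsortRec rest p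

lemma pvInsort_eq_rec (agents : List (Int × Int)) (p : Int × Int) :
    pvInsort agents p = pvInsortRec agents p := by
  induction agents with
  | nil => rfl
  | cons q rest ih =>
    by_cases h : pvLexLt p q = true
    · simp [pvInsort, pvInsortRec, h]
    · simp only [pvInsortRec, h, Bool.false_eq_true, ite_false]
      rw [← ih]
      simp [pvInsort, h]

lemma pvInsortRec_perm (l : List (Int × Int)) (p : Int × Int) :
    (pvInsortRec l p).Perm (p :: l) := by
  induction l with
  | nil => exact List.Perm.refl _
  | cons q rest ih =>
    simp only [pvInsortRec]
    by_cases h : pvLexLt p q = true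
    · simp [h]
    · simp only [h]
      exact (ih.cons q).trans (List.Perm.swap p q rest)

lemma mem_pvInsortRec {y : Int × Int} {l : List (Int × Int)} {p : Int × Int}
    (h : y ∈ pvInsortRec l p) : y = p ∨ y ∈ l := by
  have := (pvInsortRec_perm l p).mem_iff.mp h
  simpa using this

lemma pvInsortRec_pairwise (p : Int × Int) (l : List (Int × Int))
    (hl : l.Pairwise (fun a b => pvLexLt a b = true))
    (hne : ∀ y ∈ l, y.2 ≠ p.2) :
    (pvInsortRec l p).Pairwise (fun a b => pvLexLt a b = true) := by
  induction l with
  | nil => simp [pvInsortRec]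
  | cons q rest ih =>
    rcases List.pairwise_cons.mp hl with ⟨hq, hrest⟩
    simp only [pvInsortRec]
    by_cases h : pvLexLt p q = true
    · simp only [h, if_pos]
      refine List.pairwise_cons.mpr ⟨?_, hl⟩
      intro y hy
      rcases List.mem_cons.mp hy with rfl | hy'
      · exact h
      · have hqy := hq y hy'
        rw [pvLexLt_iff] at *
        omega
    · simp only [h]
      refine List.pairwise_cons.mpr ⟨?_, ih hrest (fun y hy => hne y (List.mem_cons_of_mem _ hy))⟩
      intro y hy
      rcases mem_pvInsortRec hy with rfl | hy'
      · have hq2 : q.2 ≠ y.2 := hne q List.mem_cons_self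
        rw [pvLexLt_iff] at *
        omega
      · exact hq y hy'

lemma pvPairs_set (loads : List Int) (k : Nat) (_hk : k < loads.length) (v : Int) :
    pvPairs (loads.set k v) = (pvPairs loads).set k (v, (k : Int)) := by
  apply List.ext_getElem
  · simp [pvPairs_length]
  · intro i h1 h2
    have hi : i < loads.length := by simpa [pvPairs_length] using h2
    rw [List.getElem_set]
    by_cases hik : k = i
    · subst hik
      rw [pvPairs_getElem _ k (by simpa using hi), if_pos rfl]
      simp
    · rw [pvPairs_getElem _ i (by simpa using hi), if_neg hik,
        pvPairs_getElem _ i hi]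
      simp [hik]

lemma pvSet_perm_cons {α : Type} (l : List α) (k : Nat) (hk : k < l.length) (v : α) :
    (l.set k v).Perm (v :: l.eraseIdx k) := by
  rw [List.eraseIdx_eq_take_drop_succ, List.set_eq_take_append_cons_drop, if_pos hk]
  exact List.perm_middle

lemma map_snd_pvPairs (loads : List Int) :
    (pvPairs loads).map Prod.snd = PySem.List.pyRange 0 (loads.length : Int) 1 := by
  have h := PySem.List.map_fst_enumerate loads (0 : Int)
  simp only [pvPairs, List.map_map]
  simpa using h

lemma mem_pvPairs {p : Int × Int} {loads : List Int} :
    p ∈ pvPairs loads ↔ ∃ j : Nat, j < loads.length ∧ p = (loads.getD j 0, (j : Int)) := by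
  constructor
  · intro h
    rcases List.mem_map.mp h with ⟨q, hq, rfl⟩
    rcases (PySem.List.mem_enumerate_iff _ _ _).mp hq with ⟨k, hk, rfl⟩
    exact ⟨k, hk, by simp [hk]⟩
  · rintro ⟨j, hj, rfl⟩
    have : (loads.getD j 0, (j : Int)) = (pvPairs loads)[j]'(by simpa [pvPairs_length]) := by
      rw [pvPairs_getElem _ j hj, List.getD_eq_getElem _ _ hj]
    rw [this]
    exact List.getElem_mem _

lemma pvLScan_aux (loads : List Int) :
    ∀ b : Nat, 1 ≤ b →
    ∃ k : Nat, (PySem.List.pyRange 0 (b : Int) 1).foldl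
        (fun m j => if PySem.List.pyGetD loads j 0 < PySem.List.pyGetD loads m 0 then j else m) 0
        = (k : Int) ∧ k < b ∧
      (∀ j, j < b → loads.getD k 0 ≤ loads.getD j 0) ∧
      (∀ j, j < k → loads.getD k 0 < loads.getD j 0) := by
  intro b hb
  induction b, hb using Nat.le_induction with
  | base =>
    refine ⟨0, ?_, by omega, ?_, by omega⟩
    · have h1 : ((1 : Nat) : Int) = 0 + 1 := by norm_num
      rw [h1, PySem.List.pyRange_one_singleton]
      simp
    · intro j hj
      interval_cases j
      exact le_refl _
  | succ b hb ih =>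
    rcases ih with ⟨k, hfold, hkb, hmin, hstrict⟩
    have hcast : (((b + 1 : Nat)) : Int) = (b : Int) + 1 := by push_cast; ring
    rw [hcast, PySem.List.pyRange_one_succ_right (by positivity), List.foldl_append, hfold]
    simp only [List.foldl_cons, List.foldl_nil, PySem.List.pyGetD_natCast]
    by_cases h : loads.getD b 0 < loads.getD k 0
    · refine ⟨b, by rw [if_pos h], by omega, ?_, ?_⟩
      · intro j hj
        rcases Nat.lt_succ_iff_lt_or_eq.mp hj with hj' | rfl
        · exact le_of_lt (lt_of_lt_of_le h (hmin j hj'))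
        · exact le_refl _
      · intro j hj
        exact lt_of_lt_of_le h (hmin j (by omega))
    · refine ⟨k, by rw [if_neg h], by omega, ?_, hstrict⟩
      intro j hj
      rcases Nat.lt_succ_iff_lt_or_eq.mp hj with hj' | rfl
      · exact hmin j hj'
      · exact not_lt.mp h

lemma pvLScan_spec (loads : List Int) (hne : loads ≠ []) :
    ∃ k : Nat, pvLScan (loads.length : Int) loads = (k : Int) ∧ k < loads.length ∧
      (∀ j, j < loads.length → loads.getD k 0 ≤ loads.getD j 0) ∧
      (∀ j, j < k → loads.getD k 0 < loads.getD j 0) := by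
  exact pvLScan_aux loads loads.length (by
    have : loads.length ≠ 0 := by simpa [List.length_eq_zero_iff] using hne
    omega)

lemma pvHead_agents (loads : List Int) (agents : List (Int × Int)) (hne : loads ≠ [])
    (hperm : agents.Perm (pvPairs loads))
    (hsort : agents.Pairwise (fun p q => pvLexLt p q = true)) :
    ∃ (k : Nat) (rest : List (Int × Int)),
      agents = (loads.getD k 0, (k : Int)) :: rest ∧
      pvLScan (loads.length : Int) loads = (k : Int) ∧ k < loads.length ∧
      rest.Perm ((pvPairs loads).eraseIdx k) := by
  rcases pvLScan_spec loads hne with ⟨k, hsc, hk, hmin, hstrict⟩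
  have hlen : agents.length = loads.length := by
    simpa [pvPairs_length] using hperm.length_eq
  have hnil : loads.length ≠ 0 := by simpa [List.length_eq_zero_iff] using hne
  cases agents with
  | nil => simp at hlen; omega
  | cons a rest =>
    have ha : a ∈ pvPairs loads := hperm.subset List.mem_cons_self
    rcases mem_pvPairs.mp ha with ⟨j, hj, haj⟩
    have hall : ∀ y ∈ pvPairs loads, y = a ∨ pvLexLt a y = true := by
      intro y hy
      rcases List.mem_cons.mp (hperm.mem_iff.mpr hy) with h | h
      · exact Or.inl h
      · exact Or.inr ((List.pairwise_cons.mp hsort).1 y h)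
    have hjk : j = k := by
      have hkmem : (loads.getD k 0, (k : Int)) ∈ pvPairs loads :=
        mem_pvPairs.mpr ⟨k, hk, rfl⟩
      rcases hall _ hkmem with h | h
      · rw [haj] at h
        have h1 : loads.getD k 0 = loads.getD j 0 := congrArg Prod.fst h
        have h2 : (k : Int) = (j : Int) := congrArg Prod.snd h
        omega
      · rw [haj, pvLexLt_iff] at h
        simp only at h
        have h1 := hmin j hj
        by_cases hjk : j < k
        · have := hstrict j hjk
          omega
        · omega
    subst hjk
    refine ⟨j, rest, by rw [haj], hsc, hj, ?_⟩
    · have hperm2 : (pvPairs loads).Perm (a :: (pvPairs loads).eraseIdx j) := by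
        have hjp : j < (pvPairs loads).length := by simpa [pvPairs_length]
        have := (List.getElem_cons_eraseIdx_perm hjp).symm
        rwa [pvPairs_getElem _ j hj, ← List.getD_eq_getElem _ _ hj, ← haj] at this
      exact (hperm.trans hperm2).cons_inv

lemma pvStep_inv (n : Nat) (hn : 1 ≤ n) (vm : List Int) (stA) (stB)
    (h : pvInv n stA stB) : pvInv n (pvLStep (n : Int) stA vm) (pvBStep stB vm) := by
  obtain ⟨hlen, hperm, hsort, hmin, hmap⟩ := h
  have hne : stA.1 ≠ [] := by
    intro hnil
    rw [hnil] at hlen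
    simp at hlen
    omega
  obtain ⟨k, rest, hagents, hscan, hk, hrest⟩ := pvHead_agents stA.1 stB.1 hne hperm hsort
  have hminId : stA.2.2 = (k : Int) := by rw [hmin, ← hlen]; exact hscan
  have hkp : k < (pvPairs stA.1).length := by simpa [pvPairs_length]
  have hloads' : PySem.List.pySetD stA.1 stA.2.2 (PySem.List.pyGetD stA.1 stA.2.2 0 + PySem.List.pyGetD vm 1 0)
      = stA.1.set k (stA.1.getD k 0 + PySem.List.pyGetD vm 1 0) := by
    rw [hminId]
    simp
  refine ⟨?_, ?_, ?_, ?_, ?_⟩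
  · simp only [pvLStep]
    rw [hloads']
    simpa using hlen
  · simp only [pvLStep, pvBStep, hagents]
    rw [PySem.List.pyGetD_zero_cons, PySem.List.slice_from_one]
    simp only [List.tail_cons]
    rw [hloads', pvPairs_set _ k hk _, pvInsort_eq_rec]
    refine (pvInsortRec_perm rest _).trans ?_
    refine (hrest.cons _).trans ?_
    exact (pvSet_perm_cons (pvPairs stA.1) k hkp _).symm
  · simp only [pvBStep, hagents]
    rw [PySem.List.pyGetD_zero_cons, PySem.List.slice_from_one]
    simp only [List.tail_cons]
    have hnd : ((stB.1).map Prod.snd).Nodup := by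
      refine (hperm.map Prod.snd).nodup_iff.mpr ?_
      rw [map_snd_pvPairs]
      exact PySem.List.nodup_pyRange_one _ _
    rw [hagents] at hnd
    simp only [List.map_cons, List.nodup_cons] at hnd
    rw [pvInsort_eq_rec]
    refine pvInsortRec_pairwise _ rest (List.pairwise_cons.mp (hagents ▸ hsort)).2 ?_
    intro y hy hy2
    exact hnd.1 (List.mem_map.mpr ⟨y, hy, by simpa using hy2⟩)
  · simp [pvLStep]
  · simp only [pvLStep, pvBStep, hagents]
    rw [PySem.List.pyGetD_zero_cons]
    simp only
    rw [hmap, hminId]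

lemma pvFold_inv (n : Nat) (hn : 1 ≤ n) (vms : List (List Int)) (stA) (stB)
    (h : pvInv n stA stB) :
    pvInv n (vms.foldl (pvLStep (n : Int)) stA) (vms.foldl pvBStep stB) := by
  induction vms generalizing stA stB with
  | nil => exact h
  | cons v t ih => exact ih _ _ (pvStep_inv n hn v _ _ h)

lemma pvInit_inv (agentNumber : Int) :
    pvInv agentNumber.toNat
      (((PySem.List.pyRange 0 agentNumber 1).map (fun _ => (0 : Int))), ([], 0))
      (((PySem.List.pyRange 0 agentNumber 1).map (fun i => ((0 : Int), i))), []) := by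
  have hlen0 : ((PySem.List.pyRange 0 agentNumber 1).map (fun _ => (0 : Int))).length
      = agentNumber.toNat := by
    simp [PySem.List.length_pyRange_one]
  have hzero : ∀ x ∈ (PySem.List.pyRange 0 agentNumber 1).map (fun _ => (0 : Int)), x = (0 : Int) := by
    intro x hx
    rcases List.mem_map.mp hx with ⟨_, _, rfl⟩
    rfl
  have hget0 : ∀ i : Int,
      PySem.List.pyGetD ((PySem.List.pyRange 0 agentNumber 1).map (fun _ => (0 : Int))) i 0 = 0 := by
    intro i
    by_cases h : PySem.Raise.InRange ((PySem.List.pyRange 0 agentNumber 1).map (fun _ => (0 : Int))).length i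
    · exact hzero _ (PySem.List.pyGetD_mem _ 0 h)
    · refine PySem.List.pyGetD_of_none _ _ _ ?_
      rw [PySem.List.pyGet?_eq_none_iff]
      exact h
  refine ⟨hlen0, ?_, ?_, ?_, rfl⟩
  · have heq : (PySem.List.pyRange 0 agentNumber 1).map (fun i => ((0 : Int), i))
        = pvPairs ((PySem.List.pyRange 0 agentNumber 1).map (fun _ => (0 : Int))) := by
      apply List.ext_getElem
      · simp [pvPairs_length]
      · intro i h1 h2
        have hi : i < ((PySem.List.pyRange 0 agentNumber 1).map (fun _ => (0 : Int))).length := by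
          simpa [pvPairs_length] using h2
        rw [pvPairs_getElem _ i hi]
        have hi' : i < (PySem.List.pyRange 0 agentNumber 1).length := by simpa using hi
        simp [PySem.List.getElem_pyRange_one]
    rw [heq]
  · refine List.Pairwise.map _ ?_ (PySem.List.pairwise_lt_pyRange_one _ _)
    intro a b hab
    rw [pvLexLt_iff]
    right
    exact ⟨rfl, hab⟩
  · have hf : (fun (m j : Int) =>
        if PySem.List.pyGetD ((PySem.List.pyRange 0 agentNumber 1).map (fun _ => (0 : Int))) j 0
          < PySem.List.pyGetD ((PySem.List.pyRange 0 agentNumber 1).map (fun _ => (0 : Int))) m 0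
        then j else m) = fun (m _ : Int) => m := by
      funext m j
      rw [hget0 j, hget0 m]
      simp
    show (0 : Int) = pvLScan _ _
    rw [pvLScan, hf]
    rw [List.foldl_fixed]

-- ===== VERDICT (by name: the statement is the Claim_ definition above) =====
theorem LoadBalancing_spec : Claim_equal_LoadBalancing := by
  intro restVM agentNumber _ hpre
  unfold Spec_LoadBalancing
  by_cases hag : 1 ≤ agentNumber
  · lift agentNumber to Nat using (by omega : (0:Int) ≤ agentNumber) with n
    have hn : 1 ≤ n := by exact_mod_cast hag
    simp only [LoadBalancing, LoadBalancing_alt]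
    rw [PySem.List.foldl_pyRange_zero_pyGetD
      (PySem.List.sorted restVM (fun d => PySem.List.pyGetD d 1 0) true) []
      (pvAStep (n : Int)) _]
    have habs := pvFold_abs (n : Int)
      (PySem.List.sorted restVM (fun d => PySem.List.pyGetD d 1 0) true)
      ((((PySem.List.pyRange 0 (n : Int) 1).map (fun _ => (0 : Int))).toArray), ([], 0))
    have hmapeq := congrArg (fun s => s.2.1) habs
    dsimp only at hmapeq
    rw [hmapeq]
    have hinit := pvInit_inv (n : Int)
    rw [Int.toNat_natCast] at hinit
    have hinv := pvFold_inv n hn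
      (PySem.List.sorted restVM (fun d => PySem.List.pyGetD d 1 0) true) _ _ hinit
    exact congrArg (fun m => PySem.List.sorted m (fun d => PySem.List.pyGetD d 0 0) false)
      hinv.2.2.2.2
  · have hnil : restVM = [] := by
      rcases hpre.2 with h | h
      · exact h
      · exact absurd h hag
    subst hnil
    simp [LoadBalancing, LoadBalancing_alt, PySem.List.sorted]
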